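-- pv_equiv track=rewrite | github.com/rishabhjain02/Data-Structures-And-Algorithms | Queues/First non-repeating character.py | solve
-- ===== SOURCE A (Python) =====
-- from collections import defaultdict
-- from collections import deque
--
-- def solve(A):
--     n = len(A)
--     ans = []
--     queue = deque()
--     freq = defaultdict(int)
--
--     for char in A:
--         freq[char] += 1
--         if freq[char] == 1:
--             queue.append(char)
--         while len(queue) != 0 and freq[queue[0]] > 1:
--             queue.popleft()
--
--         if len(queue) != 0:
--             ans.append(queue[0])
--         else:
--             ans.append("#")
--
--     return "".join(ans)
-- ===== SOURCE B (Python) =====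
-- def solve(A):
--     freq = {}
--     od = {}  # insertion-ordered set of chars currently seen exactly once
--     ans = []
--     for char in A:
--         f = freq.get(char, 0) + 1
--         freq[char] = f
--         if f == 1:
--             od[char] = True
--         elif f == 2:
--             del od[char]
--         ans.append(next(iter(od), "#"))
--     return "".join(ans)
-- ===== Notes on version B (the rewrite author's own statement) =====
-- stated objective: simpler
-- what changed: Replaces the deque with its lazy pop-front while-loop by an insertion-ordered dict holding exactly the currently-unique characters, removed eagerly by key the moment a character's count reaches 2, so each step just reads the first key.
import Mathlib
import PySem

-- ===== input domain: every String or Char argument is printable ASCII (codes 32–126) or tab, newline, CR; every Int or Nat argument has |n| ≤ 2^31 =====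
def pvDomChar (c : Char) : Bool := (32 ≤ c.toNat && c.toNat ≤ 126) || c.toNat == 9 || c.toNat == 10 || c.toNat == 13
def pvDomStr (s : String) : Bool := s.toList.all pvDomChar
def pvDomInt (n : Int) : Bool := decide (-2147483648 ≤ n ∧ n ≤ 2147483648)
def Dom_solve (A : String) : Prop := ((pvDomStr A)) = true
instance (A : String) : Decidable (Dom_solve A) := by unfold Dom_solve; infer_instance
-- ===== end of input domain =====

-- B replaces A's deque with its lazy pop-front while-loop by an insertion-ordered
-- set of the currently-unique characters, removed eagerly by key (objective: simpler).

-- ===== PORT A =====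
-- the inner 'while len(queue) != 0 and freq[queue[0]] > 1: queue.popleft()'
def popLoop (freq : PySem.Dict Char Int) : List Char → List Char
  | [] => []
  | q0 :: qs => if freq.getD q0 0 > 1 then popLoop freq qs else q0 :: qs

def stepA (st : List Char × List Char × PySem.Dict Char Int) (c : Char) :
    List Char × List Char × PySem.Dict Char Int :=
  let ans := st.1
  let queue := st.2.1
  let freq := st.2.2
  let freq := freq.insert c (freq.getD c 0 + 1)
  let queue := if freq.getD c 0 = 1 then queue ++ [c] else queue
  let queue := popLoop freq queue
  match queue with
  | q0 :: _ => (ans ++ [q0], queue, freq)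
  | [] => (ans ++ ['#'], queue, freq)

def solve (A : String) : String :=
  String.ofList (A.toList.foldl stepA ([], [], PySem.Dict.empty)).1

-- ===== PORT B =====
def stepB (st : List Char × PySem.Dict Char Int × List Char) (c : Char) :
    List Char × PySem.Dict Char Int × List Char :=
  let ans := st.1
  let freq := st.2.1
  let od := st.2.2
  let f := freq.getD c 0 + 1
  let freq := freq.insert c f
  let od := if f = 1 then od ++ [c] else if f = 2 then od.erase c else od
  (ans ++ [od.headD '#'], freq, od)

def solve_alt (A : String) : String :=
  String.ofList (A.toList.foldl stepB ([], PySem.Dict.empty, [])).1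

-- ===== PRECONDITION & SPEC =====
def Spec_solve (A : String) (out : String) : Prop := out = solve_alt A
instance (A : String) (out : String) : Decidable (Spec_solve A out) := by unfold Spec_solve; infer_instance

-- ===== CLAIM (what is proved, stated in full; the proofs are below) =====
def Claim_equal_solve : Prop := ∀ (A : String), Dom_solve A → Spec_solve A (solve A)

-- ===== LEMMAS AND PROOFS =====

-- abbreviation for the 'currently unique' predicate
def uniqP (g : PySem.Dict Char Int) (x : Char) : Bool := decide (g.getD x 0 ≤ 1)

lemma popLoop_sublist (g : PySem.Dict Char Int) (l : List Char) :
    (popLoop g l).Sublist l := by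
  induction l with
  | nil => simp [popLoop]
  | cons x xs ih =>
    simp only [popLoop]
    split
    · exact ih.trans (List.sublist_cons_self x xs)
    · exact List.Sublist.refl _

lemma popLoop_headD (g : PySem.Dict Char Int) (l : List Char) :
    (match popLoop g l with
      | q0 :: _ => q0
      | [] => '#') = (l.filter (uniqP g)).headD '#' := by
  induction l with
  | nil => simp [popLoop]
  | cons x xs ih =>
    simp only [popLoop, List.filter_cons]
    by_cases h : g.getD x 0 > 1
    · have : uniqP g x = false := by simp [uniqP]; omega
      simp [h, this, ih]
    · have : uniqP g x = true := by simp [uniqP]; omega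
      simp [h, this]

lemma popLoop_filter (g : PySem.Dict Char Int) (l : List Char) :
    (popLoop g l).filter (uniqP g) = l.filter (uniqP g) := by
  induction l with
  | nil => simp [popLoop]
  | cons x xs ih =>
    simp only [popLoop, List.filter_cons]
    by_cases h : g.getD x 0 > 1
    · have : uniqP g x = false := by simp [uniqP]; omega
      simp [h, this, ih]
    · have : uniqP g x = true := by simp [uniqP]; omega
      simp [h, this]

-- filtering with a predicate falsified at c equals erasing c, on a nodup list
lemma filter_eq_erase_filter {p q : Char → Bool} {c : Char} {l : List Char}
    (hnd : l.Nodup) (hpc : p c = true) (hqc : q c = false)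
    (hagree : ∀ x, x ≠ c → q x = p x) :
    l.filter q = (l.filter p).erase c := by
  induction l with
  | nil => simp
  | cons x xs ih =>
    have hnd' := hnd.of_cons
    by_cases hx : x = c
    · subst hx
      have hxs : x ∉ xs := (List.nodup_cons.mp hnd).1
      have : xs.filter q = xs.filter p := by
        apply List.filter_congr
        intro y hy
        exact hagree y (fun h => hxs (h ▸ hy))
      simp [hpc, hqc, this, List.erase_cons_head]
    · have hq : q x = p x := hagree x hx
      by_cases hp : p x = true
      · simp only [List.filter_cons, hq, hp, if_true]
        rw [List.erase_cons_tail (by simp [hx]), ih hnd']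
      · have hpx : p x = false := by simpa using hp
        simp only [List.filter_cons, hq, hpx, Bool.false_eq_true, if_false]
        exact ih hnd'

-- the loop invariant tying A's state to B's state
def LoopInv (queue od : List Char) (g : PySem.Dict Char Int) : Prop :=
  queue.Nodup ∧ (∀ x ∈ queue, 1 ≤ g.getD x 0) ∧ (∀ x, 0 ≤ g.getD x 0) ∧
    od = queue.filter (uniqP g)

lemma main_lemma (cs : List Char) :
    ∀ (ans queue od : List Char) (g : PySem.Dict Char Int), LoopInv queue od g →
    (cs.foldl stepA (ans, queue, g)).1 = (cs.foldl stepB (ans, g, od)).1 := by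
  induction cs with
  | nil => intro _ _ _ _ _; rfl
  | cons c cs ih =>
    intro ans queue od g hInv
    obtain ⟨hnd, hmem, hnn, hod⟩ := hInv
    set f : Int := g.getD c 0 + 1 with hf
    set g' : PySem.Dict Char Int := g.insert c f with hg'
    have hgc : g'.getD c 0 = f := PySem.Dict.getD_insert_self g c f 0
    have hgne : ∀ x, x ≠ c → g'.getD x 0 = g.getD x 0 := fun x hx =>
      PySem.Dict.getD_insert_of_ne g f 0 hx
    have hnn' : ∀ x, 0 ≤ g'.getD x 0 := by
      intro x
      by_cases hx : x = c
      · subst hx; rw [hgc]; have := hnn x; omega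
      · rw [hgne x hx]; exact hnn x
    -- A's new queue before popping
    set queue1 : List Char := if f = 1 then queue ++ [c] else queue with hq1
    -- B's new od
    set od' : List Char := if f = 1 then od ++ [c] else if f = 2 then od.erase c else od with hod'
    have hmem1 : ∀ x ∈ queue1, 1 ≤ g'.getD x 0 := by
      intro x hx
      rw [hq1] at hx
      by_cases hxc : x = c
      · subst hxc; rw [hgc]; have := hnn x; omega
      · rw [hgne x hxc]
        apply hmem
        split at hx
        · rcases List.mem_append.mp hx with h | h
          · exact h
          · simp at h; exact absurd h hxc
        · exact hx
    have hnd1 : queue1.Nodup := by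
      rw [hq1]
      split
      · rename_i h1
        have hc0 : g.getD c 0 = 0 := by omega
        have : c ∉ queue := by
          intro hcq
          have := hmem c hcq
          omega
        refine List.Nodup.append hnd (List.nodup_singleton c) ?_
        intro a ha hb
        simp only [List.mem_singleton] at hb
        exact this (hb ▸ ha)
      · exact hnd
    -- B's od' = filter over queue1 with the new freq
    have hodq1 : od' = queue1.filter (uniqP g') := by
      rw [hod', hq1]
      by_cases h1 : f = 1
      · have hc0 : g.getD c 0 = 0 := by omega
        have hcq : c ∉ queue := fun hcq => by have := hmem c hcq; omega
        have hfq : queue.filter (uniqP g') = queue.filter (uniqP g) := by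
          apply List.filter_congr
          intro y hy
          have : y ≠ c := fun h => hcq (h ▸ hy)
          simp [uniqP, hgne y this]
        have hc : uniqP g' c = true := by simp [uniqP, hgc, h1]
        simp [h1, List.filter_append, hfq, hod, hc]
      · by_cases h2 : f = 2
        · have hc1 : g.getD c 0 = 1 := by omega
          have hpc : uniqP g c = true := by simp [uniqP, hc1]
          have hqc : uniqP g' c = false := by simp [uniqP, hgc, h2]
          rw [if_neg h1, if_neg h1, if_pos h2, hod]
          exact (filter_eq_erase_filter hnd hpc hqc
            (fun x hx => by simp [uniqP, hgne x hx])).symm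
        · have hc2 : 2 ≤ g.getD c 0 := by have := hnn c; omega
          rw [if_neg h1, if_neg h1, if_neg h2, hod]
          apply List.filter_congr
          intro y hy
          by_cases hyc : y = c
          · subst hyc
            simp [uniqP, hgc]
            constructor <;> intro <;> omega
          · simp [uniqP, hgne y hyc]
    -- one step of each
    have hstepA : stepA (ans, queue, g) c =
        (ans ++ [(queue1.filter (uniqP g')).headD '#'], popLoop g' queue1, g') := by
      have h := popLoop_headD g' queue1
      simp only [stepA, ← hf, ← hg', hgc, ← hq1]
      rcases hpl : popLoop g' queue1 with _ | ⟨q0, qs⟩ <;>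
        simp only [hpl] at h ⊢ <;> rw [← h]
    have hstepB : stepB (ans, g, od) c =
        (ans ++ [od'.headD '#'], g', od') := by
      simp only [stepB, ← hf, ← hg', ← hod']
    rw [List.foldl_cons, List.foldl_cons, hstepA, hstepB]
    rw [ih (ans ++ [(queue1.filter (uniqP g')).headD '#']) (popLoop g' queue1)
        od' g' ?_]
    · rw [hodq1]
    · refine ⟨hnd1.sublist (popLoop_sublist g' queue1),
        fun x hx => hmem1 x ((popLoop_sublist g' queue1).subset hx), hnn', ?_⟩
      rw [hodq1, popLoop_filter]

-- ===== VERDICT (by name: the statement is the Claim_ definition above) =====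
theorem solve_spec : Claim_equal_solve := by
  intro A _
  unfold Spec_solve solve solve_alt
  have hInv : LoopInv [] [] PySem.Dict.empty :=
    ⟨List.nodup_nil, by simp, fun x => by simp [PySem.Dict.getD_empty], rfl⟩
  rw [main_lemma A.toList [] [] [] PySem.Dict.empty hInv]
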